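-- pv_equiv track=rewrite | github.com/bpbirch/DictDeque | src.py | cleanse
-- ===== SOURCE A (Python) =====
-- from string import whitespace, punctuation
--
-- def cleanse(word):
--     '''
--     This function removes punctuation and whitespace from word,
--     the string that we pass as an argument
--
--     Args:
--     word (str): string we want to strip whitespace and punctuation from
--
--     Returns:
--     cleaned (str): word with whitespace and punctuation stripped
--     '''
--     cleaned = '' # we will only include non whitespace, non punctuation characters
--     for char in word:
--         if ((char in whitespace) or (char in punctuation)):
--             pass
--         else:
--             cleaned += char.lower()
--     return cleaned
-- ===== SOURCE B (Python) =====
-- from string import whitespace, punctuation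
--
-- def cleanse(word):
--     # Instead of scanning the string once with a per-character membership test,
--     # iterate over the fixed deletion alphabet: each bad character is removed
--     # from the whole string with one replace pass; finally lowercase the result.
--     for ch in whitespace + punctuation:
--         word = word.replace(ch, '')
--     return word.lower()
-- ===== Notes on version B (the rewrite author's own statement) =====
-- stated objective: alternative
-- what changed: Inverts the traversal: instead of one Python-level scan over the string testing each character against the 38-character delete set and concatenating, B loops over the delete alphabet itself, erasing all occurrences of each bad character with a whole-string str.replace pass, and lowercases once at the end.
import Mathlib
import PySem

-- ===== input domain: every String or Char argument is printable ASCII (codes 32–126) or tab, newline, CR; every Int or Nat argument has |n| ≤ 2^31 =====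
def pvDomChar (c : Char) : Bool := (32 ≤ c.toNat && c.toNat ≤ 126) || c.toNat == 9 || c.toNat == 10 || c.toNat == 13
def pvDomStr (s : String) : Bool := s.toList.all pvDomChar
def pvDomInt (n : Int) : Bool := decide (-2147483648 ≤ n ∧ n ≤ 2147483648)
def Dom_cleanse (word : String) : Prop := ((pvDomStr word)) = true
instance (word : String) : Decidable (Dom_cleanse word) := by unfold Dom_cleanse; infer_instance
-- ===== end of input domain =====

-- B inverts the traversal: A scans the string once testing each character against the delete
-- set; B loops over the 38 delete characters, erasing each from the whole string with one
-- replace pass, then lowercases once. Return values are proved equal.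

-- string.whitespace = ' \t\n\r\x0b\x0c'
def pvWhitespace : List Char := [' ', '\t', '\n', '\r', Char.ofNat 11, Char.ofNat 12]
-- string.punctuation
def pvPunctuation : List Char := "!\"#$%&'()*+,-./:;<=>?@[\\]^_`{|}~".toList

-- ===== PORT A =====
-- for char in word: if char in whitespace or char in punctuation: pass else: cleaned += char.lower()
def cleanse (word : String) : String :=
  String.ofList (word.toList.foldl
    (fun cleaned c =>
      if pvWhitespace.contains c || pvPunctuation.contains c then cleaned
      else cleaned ++ [PySem.Chars.lowerChar c]) [])

-- ===== PORT B =====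
-- for ch in whitespace + punctuation: word = word.replace(ch, ''); return word.lower()
def cleanse_alt (word : String) : String :=
  PySem.Str.lower
    ((pvWhitespace ++ pvPunctuation).foldl
      (fun w ch => PySem.Str.replace w (String.ofList [ch]) "") word)

-- ===== PRECONDITION & SPEC =====
def Spec_cleanse (word : String) (out : String) : Prop := out = cleanse_alt word
instance (word : String) (out : String) : Decidable (Spec_cleanse word out) := by unfold Spec_cleanse; infer_instance

-- ===== CLAIM (what is proved, stated in full; the proofs are below) =====
def Claim_equal_cleanse : Prop := ∀ (word : String), Dom_cleanse word → Spec_cleanse word (cleanse word)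

-- ===== LEMMAS AND PROOFS =====

lemma toList_ofList' (l : List Char) : (String.ofList l).toList = l :=
  Eq.symm (String.ofList_eq.mp rfl)

lemma toList_empty' : ("" : String).toList = [] := by decide

-- replacing a single character by the empty string is filtering it out
lemma replace_go_single (c : Char) (l acc : List Char) (fuel : Nat) (h : l.length ≤ fuel) :
    PySem.Chars.replace.go [c] [] fuel l acc
      = acc.reverse ++ l.filter (fun x => !(x == c)) := by
  induction l generalizing fuel acc with
  | nil =>
    cases fuel with
    | zero => simp [PySem.Chars.replace.go]
    | succ f => simp [PySem.Chars.replace.go]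
  | cons x t ih =>
    cases fuel with
    | zero => simp at h
    | succ f =>
      have hf : t.length ≤ f := by simpa using h
      by_cases hx : x = c
      · subst hx
        have hpre : [x].isPrefixOf (x :: t) = true := by simp [List.isPrefixOf]
        simp [PySem.Chars.replace.go, hpre, ih _ _ hf]
      · have hpre : [c].isPrefixOf (x :: t) = false := by
          simp [List.isPrefixOf, Ne.symm hx]
        have hne : (x == c) = false := by simp [hx]
        simp [PySem.Chars.replace.go, hpre, ih _ _ hf, hne]

lemma replace_single (c : Char) (l : List Char) :
    PySem.Chars.replace l [c] [] = l.filter (fun x => !(x == c)) := by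
  simp [PySem.Chars.replace, replace_go_single c l [] l.length (le_refl _)]

-- folding replace over the bad-character alphabet filters out every bad character
lemma foldl_replace (bad : List Char) (l : List Char) :
    bad.foldl (fun w ch => PySem.Chars.replace w [ch] []) l
      = l.filter (fun x => !(bad.contains x)) := by
  induction bad generalizing l with
  | nil => simp
  | cons b bs ih =>
    rw [List.foldl_cons, replace_single, ih, List.filter_filter]
    apply List.filter_congr
    intro x _
    by_cases hxb : x = b <;> simp [hxb]

-- A's accumulator loop is filter-then-map
lemma cleanse_loop (l : List Char) (acc : List Char) :
    l.foldl
      (fun cleaned c =>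
        if pvWhitespace.contains c || pvPunctuation.contains c then cleaned
        else cleaned ++ [PySem.Chars.lowerChar c]) acc
    = acc ++ (l.filter (fun c => !((pvWhitespace ++ pvPunctuation).contains c))).map
        PySem.Chars.lowerChar := by
  have hp : (fun c => !((pvWhitespace ++ pvPunctuation).contains c))
      = (fun c => !(pvWhitespace.contains c || pvPunctuation.contains c)) :=
    funext fun c => by rw [List.contains_append]
  rw [hp]
  induction l generalizing acc with
  | nil => simp
  | cons c t ih =>
    simp only [List.foldl_cons, List.filter_cons]
    cases h : (pvWhitespace.contains c || pvPunctuation.contains c) with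
    | true => simp only [Bool.not_true, if_true, Bool.false_eq_true, if_false, ih]
    | false =>
      simp only [Bool.not_false, Bool.false_eq_true, if_false, if_true, ih,
        List.map_cons, List.append_assoc, List.singleton_append]

-- String-level replace loop moves to the list side via toList_replace
lemma foldl_str_replace_toList (bad : List Char) (s : String) :
    (bad.foldl (fun w ch => PySem.Str.replace w (String.ofList [ch]) "") s).toList
      = bad.foldl (fun w ch => PySem.Chars.replace w [ch] []) s.toList := by
  induction bad generalizing s with
  | nil => rfl
  | cons b bs ih =>
    simp only [List.foldl_cons, ih, PySem.Str.toList_replace, toList_ofList', toList_empty']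

-- ===== VERDICT (by name: the statement is the Claim_ definition above) =====
theorem cleanse_spec : Claim_equal_cleanse := by
  intro word _
  show _ = _
  unfold cleanse cleanse_alt
  apply String.ext
  rw [PySem.Str.toList_lower, foldl_str_replace_toList, foldl_replace, cleanse_loop]
  simp [PySem.Chars.lower]
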